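-- pv_equiv track=rewrite | github.com/BioMedIA-MBZUAI/SimLVSeg | simlvseg/utils.py | get_optimum_set_of_frame_indexes
-- ===== SOURCE A (Python) =====
-- def get_optimum_set_of_frame_indexes(length, period, target_index, n_frames):
--     candidates = [target_index]
--     for i in range(length - 1):
--         if i%2 == 0:
--             candidates.insert(0, candidates[0] - period)
--         else:
--             candidates.append(candidates[-1] + period)
--
--     candidates = [i for i in candidates if i < n_frames]
--
--     while len(candidates) < length:
--         candidates.insert(0, candidates[0] - period)
--
--     selected_frames = []
--     for candidate in reversed(candidates):
--         if candidate < 0: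
--             selected_frames.append(selected_frames[-1] + period)
--         else:
--             selected_frames.insert(0, candidate)
--
--     return selected_frames
-- ===== SOURCE B (Python) =====
-- def get_optimum_set_of_frame_indexes(length, period, target_index, n_frames):
--     before = length // 2
--     after = length - 1 - before
--     if period > 0:
--         top = target_index + after * period
--         if top >= n_frames:
--             # largest index of the form target_index + j*period that is < n_frames
--             top -= ((top - n_frames) // period + 1) * period
--         shift = min(length - 1, top // period)
--         start = top - shift * period
--     else:
--         start = target_index + after * period - (length - 1) * period
--     return [start + i * period for i in range(length)]
-- ===== Notes on version B (the rewrite author's own statement) =====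
-- stated objective: faster
-- what changed: A builds the candidate window with repeated list.insert(0,...), filters, refills and repairs it element by element; B computes the window's start index in closed form (clamp the centered top below n_frames with one floor division, then shift the start up to the first non-negative index) and emits the arithmetic run directly.
-- intended difference: For length <= 0 with 0 <= target_index < n_frames, A still returns the one-frame window [target_index] although no frames were requested; B returns the empty list, the intended value for a non-positive length. — e.g. on get_optimum_set_of_frame_indexes(0, 1, 2, 5): A returns [2], B returns []
import Mathlib
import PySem

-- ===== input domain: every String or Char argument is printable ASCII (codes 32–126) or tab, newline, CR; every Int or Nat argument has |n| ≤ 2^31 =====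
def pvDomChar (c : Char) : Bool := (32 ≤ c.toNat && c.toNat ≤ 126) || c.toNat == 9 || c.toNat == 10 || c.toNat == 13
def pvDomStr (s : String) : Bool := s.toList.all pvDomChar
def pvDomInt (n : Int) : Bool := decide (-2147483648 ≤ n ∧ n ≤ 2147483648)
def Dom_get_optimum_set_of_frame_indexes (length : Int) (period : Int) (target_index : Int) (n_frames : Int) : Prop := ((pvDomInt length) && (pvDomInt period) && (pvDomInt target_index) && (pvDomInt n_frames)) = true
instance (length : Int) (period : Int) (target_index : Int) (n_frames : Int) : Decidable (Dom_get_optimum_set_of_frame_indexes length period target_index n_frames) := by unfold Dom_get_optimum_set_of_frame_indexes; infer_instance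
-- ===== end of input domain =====

-- B replaces A's quadratic build/filter/refill/repair list manipulation by a closed-form
-- computation of the window's start index (objective: faster); for length ≤ 0 the intended
-- difference D_ below applies (A returns a one-frame window, B returns []).

-- ===== PORT A =====
-- 'while len(candidates) < length: candidates.insert(0, candidates[0] - period)':
-- the loop body runs exactly (length - len(candidates)).toNat times, prepending each time.
def pvPrepends (period : Int) : Nat → List Int → List Int
  | 0, cs => cs
  | k + 1, cs => pvPrepends period k ((cs.headI - period) :: cs)

def get_optimum_set_of_frame_indexes (length : Int) (period : Int) (target_index : Int) (n_frames : Int) : List Int :=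
  -- candidates = [target_index]; for i in range(length-1): prepend/append alternately
  let cands :=
    (PySem.List.pyRange 0 (length - 1) 1).foldl
      (fun cs i =>
        if PySem.Int.mod i 2 = 0 then (cs.headI - period) :: cs
        else cs ++ [cs.getLastD 0 + period]) [target_index]
  -- candidates = [i for i in candidates if i < n_frames]
  let cands := cands.filter (fun c => decide (c < n_frames))
  -- while len(candidates) < length: candidates.insert(0, candidates[0] - period)
  let cands := pvPrepends period ((length - (cands.length : Int)).toNat) cands
  -- for candidate in reversed(candidates): …
  cands.reverse.foldl
    (fun sel c => if c < 0 then sel ++ [sel.getLastD 0 + period] else c :: sel) []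

-- ===== PORT B =====
def get_optimum_set_of_frame_indexes_alt (length : Int) (period : Int) (target_index : Int) (n_frames : Int) : List Int :=
  let before := PySem.Int.floordiv length 2
  let after := length - 1 - before
  let start :=
    if 0 < period then
      let top0 := target_index + after * period
      let top :=
        if n_frames ≤ top0 then
          top0 - (PySem.Int.floordiv (top0 - n_frames) period + 1) * period
        else top0
      top - min (length - 1) (PySem.Int.floordiv top period) * period
    else target_index + after * period - (length - 1) * period
  (PySem.List.pyRange 0 length 1).map (fun i => start + i * period)

-- ===== PRECONDITION & SPEC =====
-- helpers for the precondition: the centered window's top index and its clamp below n_frames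
def pvTop0 (length : Int) (period : Int) (target_index : Int) : Int :=
  target_index + (length - 1 - PySem.Int.floordiv length 2) * period

def pvClampedTop (length : Int) (period : Int) (target_index : Int) (n_frames : Int) : Int :=
  if n_frames ≤ pvTop0 length period target_index then
    pvTop0 length period target_index -
      (PySem.Int.floordiv (pvTop0 length period target_index - n_frames) period + 1) * period
  else pvTop0 length period target_index

-- Pre_ excludes exactly the inputs on which A raises IndexError: for length ≥ 1 and period > 0,
-- every centered candidate ≥ n_frames or the clamped window top negative; for period ≤ 0, the
-- window's smallest index outside [0, n_frames); for length ≤ 0, target_index < min(0, n_frames).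
def Pre_get_optimum_set_of_frame_indexes (length : Int) (period : Int) (target_index : Int) (n_frames : Int) : Prop :=
  if 1 ≤ length then
    if 0 < period then
      target_index - PySem.Int.floordiv length 2 * period < n_frames ∧
        0 ≤ pvClampedTop length period target_index n_frames
    else
      0 ≤ pvTop0 length period target_index ∧ pvTop0 length period target_index < n_frames
  else n_frames ≤ target_index ∨ 0 ≤ target_index
instance (length : Int) (period : Int) (target_index : Int) (n_frames : Int) : Decidable (Pre_get_optimum_set_of_frame_indexes length period target_index n_frames) := by unfold Pre_get_optimum_set_of_frame_indexes; infer_instance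

def pvWitness_get_optimum_set_of_frame_indexes : Int × Int × Int × Int := (3, 1, 2, 10)

-- For length ≤ 0 with 0 ≤ target_index < n_frames, A still returns the one-frame window
-- [target_index] although no frames were requested; B returns [], the intended value.
def D_get_optimum_set_of_frame_indexes (length : Int) (period : Int) (target_index : Int) (n_frames : Int) : Prop :=
  length ≤ 0 ∧ 0 ≤ target_index ∧ target_index < n_frames
instance (length : Int) (period : Int) (target_index : Int) (n_frames : Int) : Decidable (D_get_optimum_set_of_frame_indexes length period target_index n_frames) := by unfold D_get_optimum_set_of_frame_indexes; infer_instance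

def Spec_get_optimum_set_of_frame_indexes (length : Int) (period : Int) (target_index : Int) (n_frames : Int) (out : List Int) : Prop := ¬ D_get_optimum_set_of_frame_indexes length period target_index n_frames → out = get_optimum_set_of_frame_indexes_alt length period target_index n_frames
instance (length : Int) (period : Int) (target_index : Int) (n_frames : Int) (out : List Int) : Decidable (Spec_get_optimum_set_of_frame_indexes length period target_index n_frames out) := by unfold Spec_get_optimum_set_of_frame_indexes; infer_instance

def pvDiffWitness_get_optimum_set_of_frame_indexes : Int × Int × Int × Int := (0, 1, 2, 5)
def pvDiffWitnessOut_get_optimum_set_of_frame_indexes : (List Int) × (List Int) := ([2], [])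

-- ===== CLAIM (what is proved, stated in full; the proofs are below) =====
def Claim_unchanged_get_optimum_set_of_frame_indexes : Prop := ∀ (length : Int) (period : Int) (target_index : Int) (n_frames : Int), Dom_get_optimum_set_of_frame_indexes length period target_index n_frames → Pre_get_optimum_set_of_frame_indexes length period target_index n_frames → Spec_get_optimum_set_of_frame_indexes length period target_index n_frames (get_optimum_set_of_frame_indexes length period target_index n_frames)
def Claim_changed_get_optimum_set_of_frame_indexes : Prop := Dom_get_optimum_set_of_frame_indexes (pvDiffWitness_get_optimum_set_of_frame_indexes.1) (pvDiffWitness_get_optimum_set_of_frame_indexes.2.1) (pvDiffWitness_get_optimum_set_of_frame_indexes.2.2.1) (pvDiffWitness_get_optimum_set_of_frame_indexes.2.2.2) ∧ Pre_get_optimum_set_of_frame_indexes (pvDiffWitness_get_optimum_set_of_frame_indexes.1) (pvDiffWitness_get_optimum_set_of_frame_indexes.2.1) (pvDiffWitness_get_optimum_set_of_frame_indexes.2.2.1) (pvDiffWitness_get_optimum_set_of_frame_indexes.2.2.2) ∧ D_get_optimum_set_of_frame_indexes (pvDiffWitness_get_optimum_set_of_frame_indexes.1) (pvDiffWitness_get_optimum_set_of_frame_indexes.2.1)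 (pvDiffWitness_get_optimum_set_of_frame_indexes.2.2.1) (pvDiffWitness_get_optimum_set_of_frame_indexes.2.2.2) ∧ get_optimum_set_of_frame_indexes (pvDiffWitness_get_optimum_set_of_frame_indexes.1) (pvDiffWitness_get_optimum_set_of_frame_indexes.2.1) (pvDiffWitness_get_optimum_set_of_frame_indexes.2.2.1) (pvDiffWitness_get_optimum_set_of_frame_indexes.2.2.2) = pvDiffWitnessOut_get_optimum_set_of_frame_indexes.1 ∧ get_optimum_set_of_frame_indexes_alt (pvDiffWitness_get_optimum_set_of_frame_indexes.1) (pvDiffWitness_get_optimum_set_of_frame_indexes.2.1) (pvDiffWitness_get_optimum_set_of_frame_indexes.2.2.1) (pvDiffWitness_get_optimum_set_of_frame_indexes.2.2.2) = pvDiffWitnessOut_get_optimum_set_of_frame_indexes.2 ∧ pvDiffWitnessOut_get_optimum_set_of_frame_indexes.1 ≠ pvDiffWitnessOut_get_optimum_set_of_frame_indexes.2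
def Claim_exact_get_optimum_set_of_frame_indexes : Prop := ∀ (length : Int) (period : Int) (target_index : Int) (n_frames : Int), Dom_get_optimum_set_of_frame_indexes length period target_index n_frames → Pre_get_optimum_set_of_frame_indexes length period target_index n_frames → D_get_optimum_set_of_frame_indexes length period target_index n_frames → get_optimum_set_of_frame_indexes length period target_index n_frames ≠ get_optimum_set_of_frame_indexes_alt length period target_index n_frames

-- ===== LEMMAS AND PROOFS =====


def pvRun (s p : Int) : Nat → List Int
  | 0 => []
  | k + 1 => s :: pvRun (s + p) p k

theorem pvRun_succ_append (s p : Int) (k : Nat) : pvRun s p (k + 1) = pvRun s p k ++ [s + k * p] := by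
  induction k generalizing s with
  | zero => simp [pvRun]
  | succ k ih =>
    show s :: pvRun (s+p) p (k+1) = (s :: pvRun (s+p) p k) ++ _
    rw [ih]; simp; ring

theorem length_pvRun (s p : Int) (k : Nat) : (pvRun s p k).length = k := by
  induction k generalizing s with
  | zero => rfl
  | succ k ih => simp [pvRun, ih]

theorem headI_pvRun (s p : Int) (k : Nat) : (pvRun s p (k + 1)).headI = s := rfl

theorem getLastD_pvRun (s p d : Int) (k : Nat) : (pvRun s p (k + 1)).getLastD d = s + k * p := by
  rw [pvRun_succ_append]; simp

theorem pvRun_all_ge (s p : Int) (hp : p ≤ 0) (k : Nat) :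
    ∀ x ∈ pvRun s p (k + 1), s + k * p ≤ x := by
  induction k generalizing s with
  | zero => intro x hx; simp [pvRun] at hx; simp [hx]
  | succ k ih =>
    intro x hx
    rcases (by simpa [pvRun] using hx : x = s ∨ x ∈ pvRun (s + p) p (k + 1)) with h | h
    · subst h; have : ((k:Int)+1) * p ≤ 0 := mul_nonpos_of_nonneg_of_nonpos (by positivity) hp
      push_cast; linarith
    · have := ih (s + p) x h; push_cast at this ⊢; linarith

theorem pvBuild (p t : Int) (m : Nat) :
    ((List.range m).map (fun k : Nat => (0 : Int) + k)).foldl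
      (fun cs i => if PySem.Int.mod i 2 = 0 then (cs.headI - p) :: cs
        else cs ++ [cs.getLastD 0 + p]) [t]
    = pvRun (t - ((m + 1) / 2 : Nat) * p) p (m + 1) := by
  induction m with
  | zero => simp [pvRun]
  | succ m ih =>
    rw [List.range_succ, List.map_append, List.foldl_append, ih]
    simp only [List.map_cons, List.map_nil, List.foldl_cons, List.foldl_nil]
    by_cases hm : m % 2 = 0
    · have hc : PySem.Int.mod (0 + (m:Int)) 2 = 0 := by
        rw [PySem.Int.mod_eq_emod_of_pos (by norm_num)]; omega
      rw [if_pos hc, headI_pvRun]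
      have h2 : (m+1+1)/2 = (m+1)/2 + 1 := by omega
      conv_rhs => rw [pvRun]
      rw [h2]; push_cast
      rw [show t - ((m:Int)+1)/2 * p - p = t - (((m:Int)+1)/2 + 1) * p by ring,
          show t - ((m:Int)+1)/2 * p = t - (((m:Int)+1)/2 + 1) * p + p by ring]
    · have hc : ¬ PySem.Int.mod (0 + (m:Int)) 2 = 0 := by
        rw [PySem.Int.mod_eq_emod_of_pos (by norm_num)]; omega
      have h2 : (m+1+1)/2 = (m+1)/2 := by omega
      rw [if_neg hc, getLastD_pvRun, h2,
          show t - ((m+1)/2 : Nat) * p + m * p + p = t - ((m+1)/2 : Nat) * p + ((m+1) : Nat) * p by push_cast; ring,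
          ← pvRun_succ_append]

theorem pvFilterPos (p n : Int) : ∀ (k K : Nat) (s : Int),
    (∀ j : Nat, s + j * p < n ↔ j < K) →
    (pvRun s p k).filter (fun c => decide (c < n)) = pvRun s p (min k K) := by
  intro k
  induction k with
  | zero => intro K s _; simp [pvRun]
  | succ k ih =>
    intro K s hK
    show List.filter _ (s :: pvRun (s + p) p k) = _
    rw [List.filter_cons]
    match K, hK with
    | 0, hK =>
      have h0 : ¬ s < n := by have := (hK 0).not; simpa using this
      rw [if_neg (by simpa using h0)]
      rw [ih 0 (s + p) (fun j => by
        rw [show s + p + (j:Int) * p = s + ((j+1 : Nat) : Int) * p by push_cast; ring, hK (j+1)]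
        omega)]
      simp [pvRun]
    | (K+1), hK =>
      have h0 : s < n := by have := (hK 0).mpr (by omega); simpa using this
      rw [if_pos (by simpa using h0)]
      rw [ih K (s + p) (fun j => by
        rw [show s + p + (j:Int) * p = s + ((j+1 : Nat) : Int) * p by push_cast; ring, hK (j+1)]
        omega)]
      have : min (k+1) (K+1) = min k K + 1 := by omega
      rw [this]
      rfl

theorem pvFilterDrop (p n : Int) : ∀ (k D : Nat) (s : Int), D ≤ k →
    (∀ j : Nat, j < k → (s + j * p < n ↔ D ≤ j)) →
    (pvRun s p k).filter (fun c => decide (c < n)) = pvRun (s + D * p) p (k - D) := by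
  intro k
  induction k with
  | zero => intro D s hD _; interval_cases D; simp [pvRun]
  | succ k ih =>
    intro D s hD hP
    show List.filter _ (s :: pvRun (s + p) p k) = _
    rw [List.filter_cons]
    match D, hD with
    | 0, _ =>
      have h0 : s < n := by have := (hP 0 (by omega)).mpr (by omega); simpa using this
      rw [if_pos (by simpa using h0)]
      by_cases hk : k = 0
      · subst hk; simp [pvRun]
      · rw [ih 0 (s + p) (by omega) (fun j hj => by
          rw [show s + p + (j:Int) * p = s + ((j+1 : Nat) : Int) * p by push_cast; ring, hP (j+1) (by omega)]
          omega)]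
        simp [pvRun]
    | (D+1), hD =>
      have h0 : ¬ s < n := by
        have := (hP 0 (by omega)); intro h; have := this.mp (by simpa using h); omega
      rw [if_neg (by simpa using h0)]
      rw [ih D (s + p) (by omega) (fun j hj => by
        rw [show s + p + (j:Int) * p = s + ((j+1 : Nat) : Int) * p by push_cast; ring, hP (j+1) (by omega)]
        omega)]
      rw [show s + p + (D:Int) * p = s + ((D+1 : Nat) : Int) * p by push_cast; ring, Nat.succ_sub_succ]

theorem pvRefill (p : Int) : ∀ (d k : Nat) (s : Int),
    pvPrepends p d (pvRun s p (k + 1)) = pvRun (s - d * p) p (k + 1 + d) := by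
  intro d
  induction d with
  | zero => intro k s; simp [pvPrepends]
  | succ d ih =>
    intro k s
    show pvPrepends p d (((pvRun s p (k+1)).headI - p) :: pvRun s p (k + 1)) = _
    rw [headI_pvRun]
    have hc : (s - p) :: pvRun s p (k + 1) = pvRun (s - p) p (k + 2) := by
      conv_rhs => rw [pvRun]
      rw [sub_add_cancel]
    rw [hc, ih (k+1) (s - p)]
    rw [show s - p - d * p = s - ((d:Int) + 1) * p by ring]
    push_cast
    rw [show k + 1 + 1 + d = k + 1 + (d + 1) by omega]

theorem pvSelAll (p : Int) : ∀ (l sel : List Int), (∀ x ∈ l, 0 ≤ x) →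
    l.reverse.foldl (fun sel c => if c < 0 then sel ++ [sel.getLastD 0 + p] else c :: sel) sel
    = l ++ sel := by
  intro l
  induction l with
  | nil => intro sel _; simp
  | cons x l ih =>
    intro sel hx
    rw [List.reverse_cons, List.foldl_append]
    rw [ih sel (fun y hy => hx y (by simp [hy]))]
    simp only [List.foldl_cons, List.foldl_nil]
    rw [if_neg (by have := hx x (by simp); omega)]
    simp

theorem pvSelPos (p : Int) (hp : 0 < p) (e : Int) (he : 0 ≤ e) : ∀ (k : Nat) (s : Int),
    s + k * p = e →
    (pvRun s p (k + 1)).reverse.foldl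
      (fun sel c => if c < 0 then sel ++ [sel.getLastD 0 + p] else c :: sel) []
    = pvRun (e - min (k : Int) (e / p) * p) p (k + 1) := by
  intro k
  induction k with
  | zero =>
    intro s hs; push_cast at hs
    have hse : s = e := by linarith
    simp only [pvRun, List.reverse_cons, List.reverse_nil, List.nil_append,
      List.foldl_cons, List.foldl_nil]
    rw [if_neg (by omega)]
    have hm : min (0:Int) (e / p) = 0 := by
      have : 0 ≤ e / p := Int.ediv_nonneg he hp.le
      omega
    push_cast; rw [hm]; simp [hse]
  | succ k ih =>
    intro s hs
    have hcons : pvRun s p (k + 1 + 1) = s :: pvRun (s + p) p (k + 1) := rfl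
    rw [hcons, List.reverse_cons, List.foldl_append]
    rw [ih (s + p) (by push_cast at hs ⊢; linarith)]
    simp only [List.foldl_cons, List.foldl_nil]
    have hq0 : 0 ≤ e / p := Int.ediv_nonneg he hp.le
    by_cases hsn : s < 0
    · -- append branch: top count q ≤ k
      have hek : e < ((k:Int) + 1) * p := by push_cast at hs; linarith
      have hq : e / p < (k:Int) + 1 := by
        rw [Int.ediv_lt_iff_lt_mul hp]; exact hek
      have hmin : min ((k:Int)+1) (e/p) = min (k:Int) (e/p) := by omega
      rw [if_pos hsn, getLastD_pvRun]
      conv_rhs => rw [pvRun_succ_append]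
      push_cast [hmin]
      congr 2
      ring
    · -- prepend branch: q ≥ k+1
      have hek : ((k:Int) + 1) * p ≤ e := by push_cast at hs; omega
      have hq : (k:Int) + 1 ≤ e / p := by
        rw [Int.le_ediv_iff_mul_le hp]; exact hek
      have hmin1 : min ((k:Int)+1) (e/p) = (k:Int)+1 := by omega
      have hmin2 : min ((k:Int)) (e/p) = (k:Int) := by omega
      rw [if_neg hsn]
      push_cast [hmin1, hmin2]
      have h1 : e - ((k:Int)+1) * p = s := by push_cast at hs; linarith
      have h2 : e - (k:Int) * p = s + p := by push_cast at hs; linarith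
      rw [h1, h2]
      rfl

theorem pv_map_pyRange_aux (start p : Int) : ∀ (k : Nat) (a : Int),
    (PySem.List.pyRange a (a + k) 1).map (fun i => start + i * p) = pvRun (start + a * p) p k := by
  intro k
  induction k with
  | zero => intro a; rw [show a + (0:Nat) = a by simp, PySem.List.pyRange_one_eq_nil le_rfl]; rfl
  | succ k ih =>
    intro a
    rw [PySem.List.pyRange_one_cons (show a < a + ((k+1 : Nat) : Int) by push_cast; omega)]
    simp only [List.map_cons]
    rw [show a + ((k+1 : Nat) : Int) = (a+1) + (k : Nat) by push_cast; ring, ih (a+1)]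
    conv_rhs => rw [pvRun]
    rw [show start + a * p + p = start + (a+1) * p by ring]

theorem pv_map_pyRange (start p L : Int) (hL : 0 ≤ L) :
    (PySem.List.pyRange 0 L 1).map (fun i => start + i * p) = pvRun start p L.toNat := by
  have h := pv_map_pyRange_aux start p L.toNat 0
  rw [show (0:Int) + (L.toNat : Int) = L by omega] at h
  simpa using h

-- B's value in each branch, with the clamped top folded into pvClampedTop
theorem pvAltPos (L p t n : Int) (hp : 0 < p) (hL : 0 ≤ L) :
    get_optimum_set_of_frame_indexes_alt L p t n
    = pvRun (pvClampedTop L p t n - min (L - 1) (pvClampedTop L p t n / p) * p) p L.toNat := by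
  simp only [get_optimum_set_of_frame_indexes_alt, pvClampedTop, pvTop0, if_pos hp,
    PySem.Int.floordiv_eq_ediv_of_pos hp]
  exact pv_map_pyRange _ p L hL

theorem pvAltNonpos (L p t n : Int) (hp : ¬ 0 < p) (hL : 0 ≤ L) :
    get_optimum_set_of_frame_indexes_alt L p t n
    = pvRun (pvTop0 L p t - (L - 1) * p) p L.toNat := by
  simp only [get_optimum_set_of_frame_indexes_alt, pvTop0, if_neg hp]
  exact pv_map_pyRange _ p L hL

theorem pvMainPos (L p t n : Int) (hL : 1 ≤ L) (hp : 0 < p)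
    (h1 : t - PySem.Int.floordiv L 2 * p < n)
    (h2 : 0 ≤ pvClampedTop L p t n) :
    get_optimum_set_of_frame_indexes L p t n = get_optimum_set_of_frame_indexes_alt L p t n := by
  have hfd2 : PySem.Int.floordiv L 2 = L / 2 := PySem.Int.floordiv_eq_ediv_of_pos (by norm_num)
  rw [hfd2] at h1
  set m := (L - 1).toNat with hmdef
  have hmi : (m : Int) = L - 1 := by omega
  set s := t - L / 2 * p with hsdef
  -- A side: build, filter, refill, select
  rw [pvAltPos L p t n hp (by omega)]
  simp only [get_optimum_set_of_frame_indexes]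
  rw [PySem.List.pyRange_one, show L - 1 - 0 = L - 1 by ring, pvBuild p t ((L-1).toNat)]
  rw [show t - ((((L-1).toNat + 1) / 2 : Nat) : Int) * p = s by rw [hsdef]; congr 2; omega]
  -- filter = take
  have hq0 : 0 ≤ (n - 1 - s) / p := Int.ediv_nonneg (by omega) hp.le
  set K := ((n - 1 - s) / p + 1).toNat with hKdef
  have hKi : (K : Int) = (n - 1 - s) / p + 1 := by rw [hKdef]; exact Int.toNat_of_nonneg (by omega)
  have hprop : ∀ j : Nat, s + j * p < n ↔ j < K := by
    intro j
    constructor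
    · intro h
      have hj : (j : Int) ≤ (n - 1 - s) / p := by rw [Int.le_ediv_iff_mul_le hp]; linarith
      have : (j : Int) < K := by rw [hKi]; linarith
      exact_mod_cast this
    · intro h
      have hjk : (j : Int) < K := by exact_mod_cast h
      have hj : (j : Int) ≤ (n - 1 - s) / p := by rw [hKi] at hjk; linarith
      have := (Int.le_ediv_iff_mul_le hp).mp hj
      linarith
  rw [pvFilterPos p n ((L-1).toNat + 1) K s hprop, length_pvRun]
  have hK1 : 1 ≤ K := by have := (hprop 0).mp (by simpa using h1); omega
  set k' := min ((L-1).toNat + 1) K with hk'def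
  have hk1 : 1 ≤ k' := by omega
  have hk'le : (k' : Int) ≤ L := by omega
  set d := (L - (k' : Int)).toNat with hddef
  have hdi : (d : Int) = L - k' := by omega
  -- refill back to full size
  rw [show k' = (k' - 1) + 1 by omega, pvRefill p d (k' - 1) s,
      show (k' - 1) + 1 + d = (L-1).toNat + 1 by omega]
  -- the refilled window's top equals B's clamped top
  set e := s - (d : Int) * p + (((L-1).toNat : Nat) : Int) * p with hedef
  have hh : t + (L - 1 - L / 2) * p = s + (L - 1) * p := by rw [hsdef]; ring
  have he2 : e = pvClampedTop L p t n := by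
    simp only [pvClampedTop, pvTop0, PySem.Int.floordiv_eq_ediv_of_pos hp, hfd2]
    by_cases hc : n ≤ t + (L - 1 - L / 2) * p
    · rw [if_pos hc]
      have hc' : n ≤ s + (L - 1) * p := by linarith [hh]
      have hKle : (K : Int) ≤ L - 1 := by
        have hlt : (n - 1 - s) / p < L - 1 := by
          rw [Int.ediv_lt_iff_lt_mul hp]; linarith
        rw [hKi]; linarith
      have hk'K : k' = K := by omega
      have hu := Int.ediv_add_emod (n - 1 - s) p
      have hv := Int.ediv_add_emod (t + (L - 1 - L / 2) * p - n) p
      have hru : 0 ≤ (n - 1 - s) % p := Int.emod_nonneg _ (by omega)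
      have hru2 : (n - 1 - s) % p < p := Int.emod_lt_of_pos _ hp
      have hrv : 0 ≤ (t + (L - 1 - L / 2) * p - n) % p := Int.emod_nonneg _ (by omega)
      have hrv2 : (t + (L - 1 - L / 2) * p - n) % p < p := Int.emod_lt_of_pos _ hp
      have huv : (n - 1 - s) + (t + (L - 1 - L / 2) * p - n) = (L - 1) * p - 1 := by
        rw [hsdef]; ring
      have hw : p * ((L - 1) - (n - 1 - s) / p - (t + (L - 1 - L / 2) * p - n) / p)
          = 1 + (n - 1 - s) % p + (t + (L - 1 - L / 2) * p - n) % p := by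
        linear_combination - hu - hv - huv
      have hwpos : 1 ≤ (L - 1) - (n - 1 - s) / p - (t + (L - 1 - L / 2) * p - n) / p := by
        by_contra hcon
        push_neg at hcon
        have : p * ((L - 1) - (n - 1 - s) / p - (t + (L - 1 - L / 2) * p - n) / p) ≤ 0 :=
          mul_nonpos_of_nonneg_of_nonpos hp.le (by omega)
        linarith
      have hwlt : (L - 1) - (n - 1 - s) / p - (t + (L - 1 - L / 2) * p - n) / p < 1 + 1 := by
        have h2p : p * ((L - 1) - (n - 1 - s) / p - (t + (L - 1 - L / 2) * p - n) / p)
            < p * 2 := by linarith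
        exact lt_of_mul_lt_mul_left h2p hp.le
      have hw1 : (L - 1) - (n - 1 - s) / p - (t + (L - 1 - L / 2) * p - n) / p = 1 :=
        le_antisymm (Int.lt_add_one_iff.mp hwlt) hwpos
      rw [hedef, show (((L-1).toNat : Nat) : Int) = L - 1 by omega, hdi, hk'K]
      linear_combination p * hKi - p * hw1 - hh
    · rw [if_neg hc]
      push_neg at hc
      have hc' : s + (L - 1) * p < n := by linarith [hh]
      have hKge : L ≤ (K : Int) := by
        have hle : L - 1 ≤ (n - 1 - s) / p := by
          rw [Int.le_ediv_iff_mul_le hp]; linarith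
        rw [hKi]; linarith
      have hk'L : (k' : Int) = L := by omega
      have hd0 : d = 0 := by omega
      rw [hedef, show (((L-1).toNat : Nat) : Int) = L - 1 by omega, hd0]
      push_cast
      linarith [hh]
  -- final selection loop
  have hfin := pvSelPos p hp e (by rw [he2]; exact h2) ((L-1).toNat) (s - (d : Int) * p)
    (by rw [hedef])
  rw [hfin, ← he2,
      show (((L-1).toNat : Nat) : Int) = L - 1 by omega,
      show L.toNat = (L-1).toNat + 1 by omega]

theorem pvMainNonpos (L p t n : Int) (hL : 1 ≤ L) (hp : ¬ 0 < p)
    (h1 : 0 ≤ pvTop0 L p t) (h2 : pvTop0 L p t < n) :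
    get_optimum_set_of_frame_indexes L p t n = get_optimum_set_of_frame_indexes_alt L p t n := by
  have hfd2 : PySem.Int.floordiv L 2 = L / 2 := PySem.Int.floordiv_eq_ediv_of_pos (by norm_num)
  have hple : p ≤ 0 := by omega
  set m := (L - 1).toNat with hmdef
  have hmi : (m : Int) = L - 1 := by omega
  set s := t - L / 2 * p with hsdef
  have htop : pvTop0 L p t = s + (m : Int) * p := by
    simp only [pvTop0, hfd2, hsdef, hmi]; ring
  rw [htop] at h1 h2
  rw [pvAltNonpos L p t n hp (by omega)]
  simp only [get_optimum_set_of_frame_indexes]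
  rw [PySem.List.pyRange_one, show L - 1 - 0 = L - 1 by ring, pvBuild p t ((L-1).toNat)]
  rw [show t - ((((L-1).toNat + 1) / 2 : Nat) : Int) * p = s by rw [hsdef]; congr 2; omega]
  rw [← hmdef]
  -- filter = drop D
  set D : Nat := if n ≤ s then ((s - n) / (-p) + 1).toNat else 0 with hDdef
  have hprop : ∀ j : Nat, j < m + 1 → (s + j * p < n ↔ D ≤ j) := by
    intro j hj
    by_cases hsn : n ≤ s
    · have hplt : p < 0 := by
        rcases lt_or_eq_of_le hple with h | h
        · exact h
        · exfalso; rw [h] at h2; simp at h2; omega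
      have hq : 0 ≤ (s - n) / (-p) := Int.ediv_nonneg (by omega) (by omega)
      have hDi : (D : Int) = (s - n) / (-p) + 1 := by
        rw [hDdef, if_pos hsn]; exact Int.toNat_of_nonneg (by omega)
      have hjp : (j : Int) * (-p) = -((j : Int) * p) := by ring
      constructor
      · intro h
        have h' : s - n < (j : Int) * (-p) := by linarith [hjp]
        have := (Int.ediv_lt_iff_lt_mul (by omega : (0:Int) < -p)).mpr h'
        have : (D : Int) ≤ j := by rw [hDi]; linarith
        exact_mod_cast this
      · intro h
        have hDj : (D : Int) ≤ (j : Int) := by exact_mod_cast h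
        have h' : (s - n) / (-p) < (j : Int) := by rw [hDi] at hDj; linarith
        have := (Int.ediv_lt_iff_lt_mul (by omega : (0:Int) < -p)).mp h'
        linarith [hjp]
    · have hD0 : D = 0 := by rw [hDdef, if_neg hsn]
      have hjle : (j : Int) * p ≤ 0 := mul_nonpos_of_nonneg_of_nonpos (by positivity) hple
      constructor
      · intro _; omega
      · intro _; push_neg at hsn; linarith
  have hDm : D ≤ m := by
    have := (hprop m (by omega)).mp (by push_cast; linarith [h2])
    exact this
  rw [pvFilterDrop p n (m + 1) D s (by omega) hprop, length_pvRun]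
  have hcnt : (L - ((m + 1 - D : Nat) : Int)).toNat = D := by omega
  rw [hcnt, show m + 1 - D = (m - D) + 1 by omega, pvRefill p D (m - D) (s + (D:Int) * p),
      show s + (D:Int) * p - (D:Int) * p = s by ring,
      show (m - D) + 1 + D = m + 1 by omega]
  -- all indexes non-negative: the final loop keeps the list
  rw [pvSelAll p (pvRun s p (m + 1)) [] (fun x hx => by
    have := pvRun_all_ge s p hple m x hx
    linarith [h1])]
  rw [show pvTop0 L p t - (L - 1) * p = s by rw [htop, hsdef, hmi]; ring,
      show L.toNat = m + 1 by omega]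
  simp

theorem pvMainDeg (L p t n : Int) (hL : ¬ 1 ≤ L) (h : n ≤ t) :
    get_optimum_set_of_frame_indexes L p t n = get_optimum_set_of_frame_indexes_alt L p t n := by
  simp only [get_optimum_set_of_frame_indexes, get_optimum_set_of_frame_indexes_alt]
  rw [PySem.List.pyRange_one_eq_nil (by omega : L - 1 ≤ 0),
      PySem.List.pyRange_one_eq_nil (by omega : L ≤ (0:Int))]
  simp [pvPrepends, show ¬ t < n by omega, show L.toNat = 0 by omega]

-- ===== VERDICT (by name: the statement is the Claim_ definition above) =====
theorem get_optimum_set_of_frame_indexes_spec : Claim_unchanged_get_optimum_set_of_frame_indexes := by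
  intro L p t n _ hpre
  unfold Spec_get_optimum_set_of_frame_indexes
  intro hD
  unfold Pre_get_optimum_set_of_frame_indexes at hpre
  by_cases hL : 1 ≤ L
  · rw [if_pos hL] at hpre
    by_cases hp : 0 < p
    · rw [if_pos hp] at hpre
      exact pvMainPos L p t n hL hp hpre.1 hpre.2
    · rw [if_neg hp] at hpre
      exact pvMainNonpos L p t n hL hp hpre.1 hpre.2
  · rw [if_neg hL] at hpre
    unfold D_get_optimum_set_of_frame_indexes at hD
    have hnt : n ≤ t := by
      by_contra hc; push_neg at hc
      rcases hpre with h | h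
      · omega
      · exact hD ⟨by omega, h, hc⟩
    exact pvMainDeg L p t n hL hnt

theorem get_optimum_set_of_frame_indexes_changed : Claim_changed_get_optimum_set_of_frame_indexes := by
  unfold Claim_changed_get_optimum_set_of_frame_indexes; decide

theorem get_optimum_set_of_frame_indexes_tight : Claim_exact_get_optimum_set_of_frame_indexes := by
  intro L p t n _ _ hD
  obtain ⟨hL, ht0, htn⟩ := hD
  have hA : get_optimum_set_of_frame_indexes L p t n = [t] := by
    simp only [get_optimum_set_of_frame_indexes]
    rw [PySem.List.pyRange_one_eq_nil (by omega : L - 1 ≤ 0)]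
    simp [pvPrepends, show t < n from htn, show ¬ t < 0 by omega,
      show (L - 1).toNat = 0 by omega]
  have hB : get_optimum_set_of_frame_indexes_alt L p t n = [] := by
    simp only [get_optimum_set_of_frame_indexes_alt]
    rw [PySem.List.pyRange_one_eq_nil (by omega : L ≤ (0:Int))]
    simp
  rw [hA, hB]; simp
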